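-- pv_equiv track=rewrite | github.com/theKnightsOfRohan/FHSAPCS2023-4 | src/W1/D2.py | findMaxBetweenNegatives
-- ===== SOURCE A (Python) =====
-- def findMaxBetweenNegatives(arr):
--     lowerIndex = -1
--     # upperIndex = -1
--     maxValue = -1
--     for i in range(0, len(arr)):
--         if arr[i] < 0:
--             lowerIndex = i
--             break
--
--     for i in range(lowerIndex + 1, len(arr)):
--         if arr[i] < 0:
--             break
--         elif arr[i] > maxValue:
--             maxValue = arr[i]
--
--     return maxValue
-- ===== SOURCE B (Python) =====
-- def findMaxBetweenNegatives(arr):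
--     seen = False
--     best = -1
--     for x in arr:
--         if x < 0:
--             if seen:
--                 break
--             seen = True
--             best = -1
--         elif x > best:
--             best = x
--     return best
-- ===== Notes on version B (the rewrite author's own statement) =====
-- stated objective: alternative
-- what changed: A's two sequential index loops (find first negative, then scan the following window) are replaced by one stateful pass over the elements with a seen-flag that resets the running maximum at the first negative and stops at the second.
import Mathlib
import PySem

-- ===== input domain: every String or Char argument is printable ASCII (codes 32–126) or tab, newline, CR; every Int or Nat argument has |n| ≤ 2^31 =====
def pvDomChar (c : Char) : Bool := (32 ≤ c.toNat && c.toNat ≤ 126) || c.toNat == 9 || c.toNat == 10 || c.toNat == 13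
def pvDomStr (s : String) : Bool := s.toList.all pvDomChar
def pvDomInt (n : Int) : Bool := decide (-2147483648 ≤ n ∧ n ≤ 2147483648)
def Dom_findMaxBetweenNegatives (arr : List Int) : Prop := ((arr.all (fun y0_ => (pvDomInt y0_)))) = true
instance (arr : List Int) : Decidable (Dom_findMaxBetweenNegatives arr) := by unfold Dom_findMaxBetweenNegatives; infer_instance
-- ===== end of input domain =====

-- B replaces A's two sequential index loops by one stateful pass with a seen-flag (alternative decomposition, same cost).


-- ===== PORT A =====
-- first loop of A: walk the array keeping the current index, return the index of the
-- first negative element, or fall through leaving lowerIndex = -1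
def fmbnLoop1 : List Int → Int → Int
  | [], _ => -1
  | x :: rest, i => if x < 0 then i else fmbnLoop1 rest (i + 1)

-- second loop of A: for i in range(lowerIndex+1, len(arr)): break on negative, else track max
def fmbnLoop2 : List Int → Int → Int
  | [], m => m
  | x :: rest, m => if x < 0 then m else if x > m then fmbnLoop2 rest x else fmbnLoop2 rest m

def findMaxBetweenNegatives (arr : List Int) : Int :=
  let lowerIndex := fmbnLoop1 arr 0
  fmbnLoop2 (arr.drop (lowerIndex + 1).toNat) (-1)

-- ===== PORT B =====
-- B's single loop with state (seen, best); break = return best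
def fmbnLoopB : List Int → Bool → Int → Int
  | [], _, best => best
  | x :: rest, seen, best =>
    if x < 0 then
      if seen then best else fmbnLoopB rest true (-1)
    else if x > best then fmbnLoopB rest seen x
    else fmbnLoopB rest seen best

def findMaxBetweenNegatives_alt (arr : List Int) : Int :=
  fmbnLoopB arr false (-1)

-- ===== PRECONDITION & SPEC =====
def Spec_findMaxBetweenNegatives (arr : List Int) (out : Int) : Prop := out = findMaxBetweenNegatives_alt arr
instance (arr : List Int) (out : Int) : Decidable (Spec_findMaxBetweenNegatives arr out) := by unfold Spec_findMaxBetweenNegatives; infer_instance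

-- ===== CLAIM (what is proved, stated in full; the proofs are below) =====
def Claim_equal_findMaxBetweenNegatives : Prop := ∀ (arr : List Int), Dom_findMaxBetweenNegatives arr → Spec_findMaxBetweenNegatives arr (findMaxBetweenNegatives arr)

-- ===== LEMMAS AND PROOFS =====

-- proof-side helper: the suffix of l strictly after its first negative element ([] if none)
def fmbnTailAfterNeg : List Int → List Int
  | [] => []
  | x :: rest => if x < 0 then rest else fmbnTailAfterNeg rest

-- B's loop with seen = true behaves exactly like A's second loop
theorem fmbnLoopB_seen (l : List Int) : ∀ b, fmbnLoopB l true b = fmbnLoop2 l b := by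
  induction l with
  | nil => intro b; rfl
  | cons x rest ih =>
    intro b
    simp only [fmbnLoopB, fmbnLoop2]
    split_ifs <;> simp [ih]

-- when l has no negative element, A's first loop returns -1
theorem fmbnLoop1_none (l : List Int) (h : l.all (fun x => decide (0 ≤ x)) = true) :
    ∀ i, fmbnLoop1 l i = -1 := by
  induction l with
  | nil => intro i; rfl
  | cons x rest ih =>
    intro i
    simp only [List.all_cons, Bool.and_eq_true, decide_eq_true_eq] at h
    simp only [fmbnLoop1, if_neg (by omega : ¬ x < 0)]
    exact ih h.2 (i + 1)

-- when l has a negative element, A's first loop returns i + k where dropping k+1 elements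
-- of l yields the suffix after the first negative
theorem fmbnLoop1_some (l : List Int) (h : l.any (fun x => decide (x < 0)) = true) :
    ∀ i : Int, ∃ k : Nat, fmbnLoop1 l i = i + k ∧ l.drop (k + 1) = fmbnTailAfterNeg l := by
  induction l with
  | nil => simp at h
  | cons x rest ih =>
    intro i
    by_cases hx : x < 0
    · exact ⟨0, by simp [fmbnLoop1, hx, fmbnTailAfterNeg]⟩
    · have h' : rest.any (fun x => decide (x < 0)) = true := by
        simpa [List.any_cons, hx] using h
      obtain ⟨k, hk1, hk2⟩ := ih h' (i + 1)
      refine ⟨k + 1, ?_, ?_⟩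
      · simp only [fmbnLoop1, if_neg hx]; omega
      · simpa [fmbnTailAfterNeg, hx, List.drop_succ_cons] using hk2

-- main invariant of B's loop before a negative has been seen
theorem fmbnLoopB_unseen (l : List Int) : ∀ b : Int,
    fmbnLoopB l false b =
      if l.any (fun x => decide (x < 0)) then fmbnLoop2 (fmbnTailAfterNeg l) (-1)
      else fmbnLoop2 l b := by
  induction l with
  | nil => intro b; rfl
  | cons x rest ih =>
    intro b
    by_cases hx : x < 0
    · simp [fmbnLoopB, hx, fmbnTailAfterNeg, fmbnLoopB_seen]
    · simp only [fmbnLoopB, if_neg hx, List.any_cons, decide_eq_true_eq,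
        fmbnTailAfterNeg, fmbnLoop2, hx, decide_false, Bool.false_or, if_neg hx]
      by_cases hb : x > b
      · simp [hb, ih]
      · simp [hb, ih]

-- ===== VERDICT (by name: the statement is the Claim_ definition above) =====
theorem findMaxBetweenNegatives_spec : Claim_equal_findMaxBetweenNegatives := by
  intro arr _
  unfold Spec_findMaxBetweenNegatives findMaxBetweenNegatives findMaxBetweenNegatives_alt
  rw [fmbnLoopB_unseen]
  by_cases h : arr.any (fun x => decide (x < 0)) = true
  · obtain ⟨k, hk1, hk2⟩ := fmbnLoop1_some arr h 0
    simp only [h, if_true, hk1]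
    have : ((0 : Int) + (k : Int) + 1).toNat = k + 1 := by omega
    rw [this, hk2]
  · have h' : arr.all (fun x => decide (0 ≤ x)) = true := by
      rw [List.all_eq_true]; intro x hx
      rw [List.any_eq_true] at h; push_neg at h
      have := h x hx; simp at this ⊢; omega
    rw [fmbnLoop1_none arr h' 0]
    simp [h]
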